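-- pv_equiv track=rewrite | github.com/pypi-data/pypi-mirror-162 | packages/dynamod/dynamod-0.9.7-py3-none-any.whl/dynamod/core.py | insert_at
-- ===== SOURCE A (Python) =====
-- from collections import OrderedDict
--
-- def insert_at (map:dict, key, value, at):
--     res = OrderedDict()
--     found = False
--     for k, v in map.items():
--         if k == at:
--             res[key] = value
--             found = True
--         res[k] = v
--     if not found:
--         res[key] = value
--     return res
-- ===== SOURCE B (Python) =====
-- from collections import OrderedDict
--
-- def insert_at(map: dict, key, value, at):
--     items = list(map.items())
--     keys = [k for k, _ in items]
--     if at in keys: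
--         i = keys.index(at)
--         res = OrderedDict(items[:i])
--         res[key] = value
--         res.update(items[i:])
--     else:
--         res = OrderedDict(items)
--         res[key] = value
--     return res
-- ===== Notes on version B (the rewrite author's own statement) =====
-- stated objective: idiomatic
-- what changed: B locates the split index of `at` first and assembles the result from two slices (prefix dict, inserted key, update with the suffix) instead of A's single streaming pass with a found-flag; Pre_ restricts to lists with distinct keys, the only lists that encode a Python dict argument (on duplicate-key lists the two assembly orders can differ, but no Python dict produces them).
import Mathlib
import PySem

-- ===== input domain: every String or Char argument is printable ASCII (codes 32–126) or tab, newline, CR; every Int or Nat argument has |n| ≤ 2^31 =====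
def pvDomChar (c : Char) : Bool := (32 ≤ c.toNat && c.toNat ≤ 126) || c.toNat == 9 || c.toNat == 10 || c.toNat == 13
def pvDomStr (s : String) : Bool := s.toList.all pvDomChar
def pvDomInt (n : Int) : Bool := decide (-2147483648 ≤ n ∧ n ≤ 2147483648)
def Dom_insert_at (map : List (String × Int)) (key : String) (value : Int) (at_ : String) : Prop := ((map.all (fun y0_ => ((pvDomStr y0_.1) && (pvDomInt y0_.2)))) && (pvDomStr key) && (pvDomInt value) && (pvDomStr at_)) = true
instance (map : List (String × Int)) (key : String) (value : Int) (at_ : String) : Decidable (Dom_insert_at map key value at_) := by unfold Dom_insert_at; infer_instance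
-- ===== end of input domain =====

-- B computes the split index of `at` first and assembles the result from two slices
-- (prefix dict, inserted key, update with suffix) instead of A's streaming pass with a
-- found-flag; objective: idiomatic. Equivalence is proved on lists with distinct keys
-- (the only lists that encode a Python dict argument).


-- ===== PORT A =====
-- the loop body: 'if k == at: res[key] = value; found = True' then 'res[k] = v'
def insertAtStep (key : String) (value : Int) (at_ : String)
    (st : PySem.Dict String Int × Bool) (kv : String × Int) : PySem.Dict String Int × Bool :=
  let st' := if kv.1 == at_ then (st.1.insert key value, true) else st
  (st'.1.insert kv.1 kv.2, st'.2)

def insert_at (map : List (String × Int)) (key : String) (value : Int) (at_ : String) : List (String × Int) :=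
  let st := map.foldl (insertAtStep key value at_) (PySem.Dict.empty, false)
  (if st.2 then st.1 else st.1.insert key value).items

-- ===== PORT B =====
-- 'if at in keys: i = keys.index(at)' is the match on PySem.List.index?
def insert_at_alt (map : List (String × Int)) (key : String) (value : Int) (at_ : String) : List (String × Int) :=
  let keys := map.map Prod.fst
  match PySem.List.index? keys at_ with
  | some i =>
      ((((PySem.Dict.ofList (PySem.List.slice map none (some (i : Int)))).insert key value).update
          (PySem.List.slice map (some (i : Int)) none))).items
  | none => ((PySem.Dict.ofList map).insert key value).items

-- ===== PRECONDITION & SPEC =====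
-- Pre_ requires distinct keys: A's `map` parameter is a Python dict, which can never hold a
-- duplicate key, so a duplicate-key association list encodes no Python input at all (on such
-- lists the two assembly orders may differ, but neither corresponds to any dict).
def Pre_insert_at (map : List (String × Int)) (key : String) (value : Int) (at_ : String) : Prop :=
  (map.map Prod.fst).Nodup
instance (map : List (String × Int)) (key : String) (value : Int) (at_ : String) : Decidable (Pre_insert_at map key value at_) := by unfold Pre_insert_at; infer_instance

def pvWitness_insert_at : (List (String × Int)) × String × Int × String := ([("a", 1), ("b", 2)], "x", 5, "b")

def Spec_insert_at (map : List (String × Int)) (key : String) (value : Int) (at_ : String) (out : List (String × Int)) : Prop := out = insert_at_alt map key value at_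
instance (map : List (String × Int)) (key : String) (value : Int) (at_ : String) (out : List (String × Int)) : Decidable (Spec_insert_at map key value at_ out) := by unfold Spec_insert_at; infer_instance

-- ===== CLAIM (what is proved, stated in full; the proofs are below) =====
def Claim_equal_insert_at : Prop := ∀ (map : List (String × Int)) (key : String) (value : Int) (at_ : String), Dom_insert_at map key value at_ → Pre_insert_at map key value at_ → Spec_insert_at map key value at_ (insert_at map key value at_)

-- ===== LEMMAS AND PROOFS =====

-- plain insertion fold (what Dict.update does)
def insFold (d : PySem.Dict String Int) (l : List (String × Int)) : PySem.Dict String Int :=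
  l.foldl (fun acc p => acc.insert p.1 p.2) d

-- over a segment that never mentions at_, A's loop is the plain insertion fold
lemma loop_no_at (key : String) (value : Int) (at_ : String) (l : List (String × Int))
    (h : ∀ p ∈ l, p.1 ≠ at_) (d : PySem.Dict String Int) (b : Bool) :
    l.foldl (insertAtStep key value at_) (d, b) = (insFold d l, b) := by
  induction l generalizing d with
  | nil => rfl
  | cons p rest ih =>
      have hp : p.1 ≠ at_ := h p (List.mem_cons_self)
      have hrest : ∀ q ∈ rest, q.1 ≠ at_ := fun q hq => h q (List.mem_cons_of_mem _ hq)
      simp only [List.foldl_cons, insertAtStep, beq_iff_eq, if_neg hp]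
      exact ih hrest _

-- A's loop on pre ++ (at_, v) :: suf with at_ absent from pre and suf
lemma loop_split (key : String) (value : Int) (at_ : String) (v : Int)
    (pre suf : List (String × Int))
    (hpre : ∀ p ∈ pre, p.1 ≠ at_) (hsuf : ∀ p ∈ suf, p.1 ≠ at_) :
    (pre ++ (at_, v) :: suf).foldl (insertAtStep key value at_) (PySem.Dict.empty, false)
      = (insFold (((insFold PySem.Dict.empty pre).insert key value).insert at_ v) suf, true) := by
  rw [List.foldl_append, loop_no_at key value at_ pre hpre _ false]
  simp only [List.foldl_cons, insertAtStep, beq_self_eq_true, if_pos]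
  exact loop_no_at key value at_ suf hsuf _ true

-- ===== VERDICT (by name: the statement is the Claim_ definition above) =====
theorem insert_at_spec : Claim_equal_insert_at := by
  intro map key value at_ _ hpre
  unfold Spec_insert_at insert_at insert_at_alt
  rcases hidx : PySem.List.index? (map.map Prod.fst) at_ with _ | i
  · -- at_ not among the keys
    have hnm : at_ ∉ map.map Prod.fst := (PySem.List.index?_eq_none_iff _ _).mp hidx
    have h : ∀ p ∈ map, p.1 ≠ at_ := by
      intro p hp he
      exact hnm (he ▸ List.mem_map_of_mem hp)
    simp only [hidx, loop_no_at key value at_ map h PySem.Dict.empty false]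
    rfl
  · -- at_ first occurs at index i
    rcases (PySem.List.index?_eq_some_iff (map.map Prod.fst) at_ i).mp hidx with
      ⟨preK, sufK, hsplit, hlen, hnotpre⟩
    have hiK : i < (map.map Prod.fst).length := by
      rw [hsplit]; simp; omega
    have hi : i < map.length := by simpa using hiK
    have hgetK : map[i].1 = at_ := by
      have h1 : (map.map Prod.fst)[i]? = some at_ := by
        rw [hsplit, List.getElem?_append_right (by omega)]
        simp [hlen]
      rw [List.getElem?_map, List.getElem?_eq_getElem hi] at h1
      simpa using h1
    have htakeK : (map.take i).map Prod.fst = preK := by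
      have := congrArg (List.take i) hsplit
      simpa [List.map_take, hlen] using this
    have hdropsuf : (preK ++ at_ :: sufK).drop (i + 1) = sufK := by
      rw [← hlen, List.drop_append]
      simp
    have hdropK : (map.drop (i + 1)).map Prod.fst = sufK := by
      rw [List.map_drop, hsplit, hdropsuf]
    have hnd : (preK ++ at_ :: sufK).Nodup := by
      have h2 := hpre
      unfold Pre_insert_at at h2
      rwa [hsplit] at h2
    have hnotsuf : at_ ∉ sufK := by
      simp only [List.nodup_append, List.nodup_cons] at hnd
      tauto
    have hpre' : ∀ p ∈ map.take i, p.1 ≠ at_ := by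
      intro p hp he
      exact hnotpre (he ▸ htakeK ▸ List.mem_map_of_mem hp)
    have hsuf' : ∀ p ∈ map.drop (i + 1), p.1 ≠ at_ := by
      intro p hp he
      exact hnotsuf (he ▸ hdropK ▸ List.mem_map_of_mem hp)
    have hcons : map[i] = (at_, map[i].2) := Prod.ext hgetK rfl
    conv_lhs => rw [show map = map.take i ++ map[i] :: map.drop (i + 1) by
      conv_lhs => rw [← List.take_append_drop i map]
      rw [List.drop_eq_getElem_cons hi]]
    rw [hcons, loop_split key value at_ map[i].2 (map.take i) (map.drop (i + 1)) hpre' hsuf']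
    simp only [hidx, PySem.List.slice_to_natCast, PySem.List.slice_from_natCast]
    rw [List.drop_eq_getElem_cons hi, hcons]
    rfl
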